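-- pv_equiv track=rewrite | github.com/BogdNV/note_manager | search_notes_function.py | search_notes
-- ===== SOURCE A (Python) =====
-- def  search_notes(notes, keyword=None, status=None):
--     if keyword and status:
--         return [
--             note for note in notes
--             if (any(keyword in note[key].lower() for key in ("username", "title", "content")))
--             and (note.get("status").lower() == status)
--         ]
--     if keyword:
--         return [
--             note for note in notes
--             if (any(keyword in note[key].lower() for key in ("username", "title", "content")))
--         ]
--     if status:
--         return [
--             note for note in notes
--             if (note.get("status").lower() == status)
--         ]
--     return notes
-- ===== SOURCE B (Python) =====
-- def search_notes(notes, keyword=None, status=None):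
--     # Filter-pipeline rewrite: collect the active filters as functions, then
--     # apply them as staged passes over the data (keyword stage first, so each
--     # note is examined by the stages in A's order).  With no active filter the
--     # original list object is returned unchanged.
--     stages = []
--     if keyword:
--         stages.append(lambda n: any(keyword in n[k].lower()
--                                     for k in ("username", "title", "content")))
--     if status:
--         stages.append(lambda n: n.get("status").lower() == status)
--     result = notes
--     for stage in stages:
--         result = [n for n in result if stage(n)]
--     return result
-- ===== Notes on version B (the rewrite author's own statement) =====
-- stated objective: alternative
-- what changed: Replaces A's four-way branch of combined comprehensions with a data-driven filter pipeline: the active filters are collected into a list of predicate functions and applied as staged passes over the notes.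
import Mathlib
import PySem

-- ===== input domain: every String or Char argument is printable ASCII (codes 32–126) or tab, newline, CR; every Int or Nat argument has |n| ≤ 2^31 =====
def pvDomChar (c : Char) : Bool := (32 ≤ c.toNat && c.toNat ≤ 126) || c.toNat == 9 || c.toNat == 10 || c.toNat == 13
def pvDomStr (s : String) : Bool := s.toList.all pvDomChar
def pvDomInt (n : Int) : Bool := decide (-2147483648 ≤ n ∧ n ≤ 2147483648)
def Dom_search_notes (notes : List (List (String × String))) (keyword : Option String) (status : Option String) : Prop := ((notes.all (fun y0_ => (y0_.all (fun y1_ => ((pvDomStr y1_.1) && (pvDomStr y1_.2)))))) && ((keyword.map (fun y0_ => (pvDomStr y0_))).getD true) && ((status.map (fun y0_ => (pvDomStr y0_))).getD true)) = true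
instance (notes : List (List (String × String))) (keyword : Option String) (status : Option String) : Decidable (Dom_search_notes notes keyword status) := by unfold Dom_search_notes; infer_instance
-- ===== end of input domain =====

-- B replaces A's four-way branch of combined comprehensions with a data-driven filter
-- pipeline (a list of active predicate functions applied as staged passes); objective:
-- alternative. Return-value equivalence only.

-- ===== PORT A =====
-- Python truthiness of an optional string argument (None and "" are falsy).
def pyTruthyA (o : Option String) : Bool :=
  match o with
  | some s => s ≠ ""
  | none => false

-- any(keyword in note[key].lower() for key in ("username","title","content"));
-- note[key] raises KeyError when absent — Pre_ excludes that, getD "" is only reached outside Pre_.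
def kwAnyA (note : List (String × String)) (kw : String) : Bool :=
  ["username", "title", "content"].any
    (fun k => PySem.Str.isIn kw (PySem.Str.lower (PySem.Dict.getD (PySem.Dict.mk note) k "")))

-- note.get("status").lower() == status; .get returns None when absent and .lower() then raises
-- AttributeError — Pre_ excludes that, getD "" is only reached outside Pre_.
def statusEqA (note : List (String × String)) (st : String) : Bool :=
  PySem.Str.lower (PySem.Dict.getD (PySem.Dict.mk note) "status" "") == st

def search_notes (notes : List (List (String × String))) (keyword : Option String) (status : Option String) : List (List (String × String)) :=
  if pyTruthyA keyword && pyTruthyA status then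
    notes.filter (fun note => kwAnyA note (keyword.getD "") && statusEqA note (status.getD ""))
  else if pyTruthyA keyword then
    notes.filter (fun note => kwAnyA note (keyword.getD ""))
  else if pyTruthyA status then
    notes.filter (fun note => statusEqA note (status.getD ""))
  else
    notes

-- ===== PORT B =====
-- the keyword stage of Source B's pipeline
def kwStage (kw : String) : List (String × String) → Bool := fun n =>
  ["username", "title", "content"].any
    (fun k => PySem.Str.isIn kw (PySem.Str.lower (PySem.Dict.getD (PySem.Dict.mk n) k "")))

-- the status stage of Source B's pipeline
def stStage (st : String) : List (String × String) → Bool := fun n =>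
  PySem.Str.lower (PySem.Dict.getD (PySem.Dict.mk n) "status" "") == st

def search_notes_alt (notes : List (List (String × String))) (keyword : Option String) (status : Option String) : List (List (String × String)) :=
  let stages : List (List (String × String) → Bool) :=
    (if keyword.getD "" ≠ "" then [kwStage (keyword.getD "")] else []) ++
    (if status.getD "" ≠ "" then [stStage (status.getD "")] else [])
  stages.foldl (fun result stage => result.filter stage) notes

-- ===== PRECONDITION & SPEC =====
-- Pre_ excludes inputs where a note lacks a key the active filters read ("username"/"title"/
-- "content" under a truthy keyword, "status" under a truthy status): there A raises KeyError or
-- AttributeError — except when short-circuit filters the note out first, an accident of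
-- evaluation order on which B returns the same value anyway.
def Pre_search_notes (notes : List (List (String × String))) (keyword : Option String) (status : Option String) : Prop :=
  (keyword.getD "" ≠ "" → ∀ note ∈ notes,
      PySem.Dict.contains (PySem.Dict.mk note) "username" = true ∧
      PySem.Dict.contains (PySem.Dict.mk note) "title" = true ∧
      PySem.Dict.contains (PySem.Dict.mk note) "content" = true) ∧
  (status.getD "" ≠ "" → ∀ note ∈ notes, PySem.Dict.contains (PySem.Dict.mk note) "status" = true)
instance (notes : List (List (String × String))) (keyword : Option String) (status : Option String) : Decidable (Pre_search_notes notes keyword status) := by unfold Pre_search_notes; infer_instance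

def pvWitness_search_notes : (List (List (String × String))) × Option String × Option String :=
  ([[("username", "alice"), ("title", "Plan"), ("content", "draft"), ("status", "new")]],
   some "a", some "new")

def Spec_search_notes (notes : List (List (String × String))) (keyword : Option String) (status : Option String) (out : List (List (String × String))) : Prop := out = search_notes_alt notes keyword status
instance (notes : List (List (String × String))) (keyword : Option String) (status : Option String) (out : List (List (String × String))) : Decidable (Spec_search_notes notes keyword status out) := by unfold Spec_search_notes; infer_instance

-- ===== CLAIM (what is proved, stated in full; the proofs are below) =====
def Claim_equal_search_notes : Prop := ∀ (notes : List (List (String × String))) (keyword : Option String) (status : Option String), Dom_search_notes notes keyword status → Pre_search_notes notes keyword status → Spec_search_notes notes keyword status (search_notes notes keyword status)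

-- ===== LEMMAS AND PROOFS =====
theorem pyTruthyA_true {o : Option String} : pyTruthyA o = true ↔ o.getD "" ≠ "" := by
  cases o <;> simp [pyTruthyA]

theorem kwStage_eq (kw : String) (n : List (String × String)) :
    kwStage kw n = kwAnyA n kw := rfl

theorem stStage_eq (st : String) (n : List (String × String)) :
    stStage st n = statusEqA n st := rfl

-- ===== VERDICT (by name: the statement is the Claim_ definition above) =====
theorem search_notes_spec : Claim_equal_search_notes := by
  intro notes keyword status _ _
  unfold Spec_search_notes search_notes search_notes_alt
  by_cases hk : keyword.getD "" ≠ "" <;> by_cases hs : status.getD "" ≠ ""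
  · rw [if_pos (by simp [pyTruthyA_true.mpr hk, pyTruthyA_true.mpr hs])]
    simp only [if_pos hk, if_pos hs, List.singleton_append, List.foldl_cons, List.foldl_nil,
      List.filter_filter]
    exact List.filter_congr (fun n _ => by rw [kwStage_eq, stStage_eq, Bool.and_comm])
  · rw [if_neg (by simp [pyTruthyA_true, hs]), if_pos (pyTruthyA_true.mpr hk)]
    simp only [if_pos hk, if_neg hs, List.append_nil, List.foldl_cons, List.foldl_nil]
    exact (List.filter_congr (fun n _ => (kwStage_eq _ n).symm))
  · rw [if_neg (by simp [pyTruthyA_true, hk]),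
        if_neg (by simp [pyTruthyA_true, hk]), if_pos (pyTruthyA_true.mpr hs)]
    simp only [if_neg hk, if_pos hs, List.nil_append, List.foldl_cons, List.foldl_nil]
    exact (List.filter_congr (fun n _ => (stStage_eq _ n).symm))
  · rw [if_neg (by simp [pyTruthyA_true, hk]),
        if_neg (by simp [pyTruthyA_true, hk]),
        if_neg (by simp [pyTruthyA_true, hs])]
    simp [hk, hs]
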